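-- pv_equiv track=rewrite | github.com/Plastonick/advent-of-code | 2021/03 - Binary Diagnostics/main.py | get_bit_frequency
-- ===== SOURCE A (Python) =====
-- from typing import List
--
-- def get_bit_frequency(lines: List[List[int]]) -> List[int]:
--     freq = [0 for _ in range(12)]
--
--     for line in lines:
--         i = 0
--         for bit in line:
--             if bit == "1":
--                 freq[i] += 1
--             elif bit == "0":
--                 freq[i] -= 1
--
--             i += 1
--
--     return freq
-- ===== SOURCE B (Python) =====
-- from typing import List
--
-- def get_bit_frequency(lines: List[List[int]]) -> List[int]:
--     freq = [0] * 12
--     max_len = max((len(line) for line in lines), default=0)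
--     for i in range(min(max_len, 12)):
--         for line in lines:
--             if i < len(line):
--                 bit = line[i]
--                 if bit == "1":
--                     freq[i] += 1
--                 elif bit == "0":
--                     freq[i] -= 1
--     return freq
-- ===== Notes on version B (the rewrite author's own statement) =====
-- stated objective: alternative
-- what changed: A's row-major scan (one pass per line with a running column index mutating freq) is replaced by a column-major scan: compute max line length once, then for each of the first min(max_len,12) columns loop over all lines and accumulate that column's count.
import Mathlib
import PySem

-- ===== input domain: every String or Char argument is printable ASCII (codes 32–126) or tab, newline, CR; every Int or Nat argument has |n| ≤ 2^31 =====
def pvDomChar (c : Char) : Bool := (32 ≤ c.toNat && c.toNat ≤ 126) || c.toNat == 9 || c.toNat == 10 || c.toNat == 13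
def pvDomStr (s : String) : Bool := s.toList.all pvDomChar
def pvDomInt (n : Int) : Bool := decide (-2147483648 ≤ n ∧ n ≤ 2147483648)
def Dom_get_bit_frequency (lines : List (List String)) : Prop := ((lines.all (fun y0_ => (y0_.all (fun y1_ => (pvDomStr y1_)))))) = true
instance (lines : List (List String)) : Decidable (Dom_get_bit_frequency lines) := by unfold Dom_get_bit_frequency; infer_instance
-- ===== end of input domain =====

-- B is a column-major re-decomposition of A's row-major scan (same cost, different traversal);
-- where A raises IndexError (a '1'/'0' bit at column index ≥ 12) B ignores the column and returns.

-- ===== PORT A =====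
-- shared update helper: the 'if bit == "1": freq[i] += 1 elif bit == "0": freq[i] -= 1' body;
-- freq[i] is ported with getD/set, exact under Pre_ (the touched index is < 12 = freq length;
-- outside Pre_ the Python raises IndexError where List.set is a no-op).
def pvValStep (f : List Int) (i : Nat) (bit : String) : List Int :=
  if bit = "1" then f.set i (f.getD i 0 + 1)
  else if bit = "0" then f.set i (f.getD i 0 - 1)
  else f

-- inner 'for bit in line' loop of A, carrying (freq, i)
def pvInnerA (line : List String) (s : List Int × Nat) : List Int × Nat :=
  line.foldl (fun s bit => (pvValStep s.1 s.2 bit, s.2 + 1)) s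

def get_bit_frequency (lines : List (List String)) : List Int :=
  lines.foldl (fun freq line => (pvInnerA line (freq, 0)).1) (List.replicate 12 0)

-- ===== PORT B =====
-- inner 'for line in lines' loop of B at column i
def pvInnerB (lines : List (List String)) (i : Nat) (freq : List Int) : List Int :=
  lines.foldl (fun freq line =>
    if i < line.length then pvValStep freq i (line.getD i "") else freq) freq

def get_bit_frequency_alt (lines : List (List String)) : List Int :=
  let maxLen := lines.foldl (fun m line => max m line.length) 0
  (List.range (min maxLen 12)).foldl (fun freq i => pvInnerB lines i freq)
    (List.replicate 12 0)

-- ===== PRECONDITION & SPEC =====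
-- Pre_ excludes exactly the inputs on which A raises IndexError: some line carrying a
-- '1' or '0' bit at column index ≥ 12 (freq has only 12 slots).
def Pre_get_bit_frequency (lines : List (List String)) : Prop :=
  ∀ l ∈ lines, ∀ b ∈ l.drop 12, b ≠ "1" ∧ b ≠ "0"
instance (lines : List (List String)) : Decidable (Pre_get_bit_frequency lines) := by
  unfold Pre_get_bit_frequency; infer_instance

def pvWitness_get_bit_frequency : List (List String) :=
  [["1", "0", "1"], ["0", "x", "1"], []]

def Spec_get_bit_frequency (lines : List (List String)) (out : List Int) : Prop := out = get_bit_frequency_alt lines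
instance (lines : List (List String)) (out : List Int) : Decidable (Spec_get_bit_frequency lines out) := by unfold Spec_get_bit_frequency; infer_instance

-- ===== CLAIM (what is proved, stated in full; the proofs are below) =====
def Claim_equal_get_bit_frequency : Prop := ∀ (lines : List (List String)), Dom_get_bit_frequency lines → Pre_get_bit_frequency lines → Spec_get_bit_frequency lines (get_bit_frequency lines)

-- ===== LEMMAS AND PROOFS =====

-- signed value of one bit string
def pvVal (b : String) : Int := if b = "1" then 1 else if b = "0" then -1 else 0

-- contribution of line's column j (0 if the line is shorter)
def pvColVal (line : List String) (j : Nat) : Int :=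
  if j < line.length then pvVal (line.getD j "") else 0

def pvSumCol (lines : List (List String)) (j : Nat) : Int :=
  (lines.map (pvColVal · j)).sum

lemma pvValStep_length (f : List Int) (i : Nat) (b : String) :
    (pvValStep f i b).length = f.length := by
  unfold pvValStep; split_ifs <;> simp

lemma pvValStep_getD (f : List Int) (i j : Nat) (b : String) (hj : j < f.length) :
    (pvValStep f i b).getD j 0 = f.getD j 0 + (if j = i then pvVal b else 0) := by
  have hset : ∀ (v : Int), (f.set i v).getD j 0
      = if j = i then (if i < f.length then v else f.getD j 0) else f.getD j 0 := by
    intro v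
    simp only [List.getD_eq_getElem?_getD, List.getElem?_set]
    by_cases h : i = j
    · subst h; split_ifs <;> simp_all
    · simp [h, show ¬ j = i from fun he => h he.symm]
  by_cases h : j = i
  · subst h
    rw [if_pos rfl]
    unfold pvValStep pvVal
    split_ifs with h1 h0
    · rw [hset]; simp [hj]
    · rw [hset]; simp [hj]; ring
    · simp
  · rw [if_neg h]
    unfold pvValStep
    split_ifs with h1 h0
    · rw [hset, if_neg h]; simp
    · rw [hset, if_neg h]; simp
    · simp

lemma pvInnerA_length (line : List String) : ∀ s : List Int × Nat,
    (pvInnerA line s).1.length = s.1.length := by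
  induction line with
  | nil => intro s; simp [pvInnerA]
  | cons b t ih =>
      intro s
      show (pvInnerA t (pvValStep s.1 s.2 b, s.2 + 1)).1.length = s.1.length
      rw [ih]; exact pvValStep_length _ _ _

lemma pvInnerA_getD (line : List String) : ∀ (f : List Int) (k j : Nat), j < f.length →
    (pvInnerA line (f, k)).1.getD j 0
      = f.getD j 0 + (if k ≤ j ∧ j - k < line.length then pvVal (line.getD (j - k) "") else 0) := by
  induction line with
  | nil => intro f k j hj; simp [pvInnerA]
  | cons b t ih =>
      intro f k j hj
      have hstep : pvInnerA (b :: t) (f, k) = pvInnerA t (pvValStep f k b, k + 1) := rfl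
      rw [hstep, ih _ _ _ (by rw [pvValStep_length]; exact hj), pvValStep_getD f k j b hj]
      rcases Nat.lt_trichotomy j k with hlt | heq | hgt
      · simp [show j ≠ k by omega, show ¬ (k + 1 ≤ j) by omega, show ¬ (k ≤ j) by omega]
      · rw [heq]
        simp [show ¬ (k + 1 ≤ k) by omega]
      · have hk1 : k + 1 ≤ j := by omega
        have hk : k ≤ j := by omega
        have hsub : j - k = (j - (k + 1)) + 1 := by omega
        rw [if_neg (show ¬ j = k by omega), hsub]
        simp [hk1, hk]

lemma pvOuterA_length (lines : List (List String)) : ∀ f : List Int,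
    (lines.foldl (fun freq line => (pvInnerA line (freq, 0)).1) f).length = f.length := by
  induction lines with
  | nil => intro f; simp
  | cons l t ih => intro f; simp only [List.foldl_cons]; rw [ih, pvInnerA_length]

lemma pvOuterA_getD (lines : List (List String)) : ∀ (f : List Int) (j : Nat), j < f.length →
    (lines.foldl (fun freq line => (pvInnerA line (freq, 0)).1) f).getD j 0
      = f.getD j 0 + pvSumCol lines j := by
  induction lines with
  | nil => intro f j hj; simp [pvSumCol]
  | cons l t ih =>
      intro f j hj
      simp only [List.foldl_cons]
      rw [ih _ _ (by rw [pvInnerA_length]; exact hj), pvInnerA_getD l f 0 j hj]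
      simp only [pvSumCol, List.map_cons, List.sum_cons, pvColVal, Nat.sub_zero, Nat.zero_le,
        true_and]
      ring

lemma pvInnerB_length (lines : List (List String)) (i : Nat) : ∀ f : List Int,
    (pvInnerB lines i f).length = f.length := by
  induction lines with
  | nil => intro f; simp [pvInnerB]
  | cons l t ih =>
      intro f
      show (pvInnerB t i (if i < l.length then pvValStep f i (l.getD i "") else f)).length = _
      rw [ih]; split_ifs <;> simp [pvValStep_length]

lemma pvInnerB_getD (lines : List (List String)) (i : Nat) : ∀ (f : List Int) (j : Nat),
    j < f.length →
    (pvInnerB lines i f).getD j 0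
      = f.getD j 0 + (if j = i then pvSumCol lines j else 0) := by
  induction lines with
  | nil => intro f j hj; simp [pvInnerB, pvSumCol]
  | cons l t ih =>
      intro f j hj
      have hstep : pvInnerB (l :: t) i f
          = pvInnerB t i (if i < l.length then pvValStep f i (l.getD i "") else f) := rfl
      by_cases h : i < l.length
      · rw [hstep, if_pos h, ih _ j (by rw [pvValStep_length]; exact hj),
            pvValStep_getD f i j _ hj]
        simp only [pvSumCol, List.map_cons, List.sum_cons, pvColVal]
        by_cases hji : j = i
        · subst hji; simp [h]; ring
        · simp [hji]
      · rw [hstep, if_neg h, ih _ j hj]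
        simp only [pvSumCol, List.map_cons, List.sum_cons, pvColVal]
        by_cases hji : j = i
        · subst hji; simp [h]
        · simp [hji]

lemma pvOuterB_length (lines : List (List String)) : ∀ (ns : List Nat) (f : List Int),
    (ns.foldl (fun freq i => pvInnerB lines i freq) f).length = f.length := by
  intro ns
  induction ns with
  | nil => intro f; simp
  | cons n t ih => intro f; simp only [List.foldl_cons]; rw [ih, pvInnerB_length]

lemma pvOuterB_getD (lines : List (List String)) : ∀ (N : Nat) (f : List Int) (j : Nat),
    j < f.length →
    ((List.range N).foldl (fun freq i => pvInnerB lines i freq) f).getD j 0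
      = f.getD j 0 + (if j < N then pvSumCol lines j else 0) := by
  intro N
  induction N with
  | zero => intro f j hj; simp
  | succ n ih =>
      intro f j hj
      rw [List.range_succ, List.foldl_append, List.foldl_cons, List.foldl_nil]
      rw [pvInnerB_getD lines n _ j (by rw [pvOuterB_length]; exact hj), ih _ _ hj]
      by_cases hjn : j = n
      · subst hjn; simp
      · by_cases hlt : j < n
        · simp [hjn, hlt, Nat.lt_succ_of_lt hlt]
        · simp [hjn, hlt, show ¬ j < n + 1 by omega]

lemma pvFoldMax_init_le : ∀ (ls : List (List String)) (a : Nat),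
    a ≤ ls.foldl (fun m line => max m line.length) a := by
  intro ls
  induction ls with
  | nil => intro a; simp
  | cons x t ih =>
      intro a
      simp only [List.foldl_cons]
      exact le_trans (Nat.le_max_left _ _) (ih _)

lemma pvMaxLen_le : ∀ (ls : List (List String)) (a : Nat), ∀ l ∈ ls,
    l.length ≤ ls.foldl (fun m line => max m line.length) a := by
  intro ls
  induction ls with
  | nil => intro a l hl; simp at hl
  | cons x t ih =>
      intro a l hl
      simp only [List.foldl_cons]
      rcases List.mem_cons.mp hl with h | h
      · subst h; exact le_trans (Nat.le_max_right _ _) (pvFoldMax_init_le t _)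
      · exact ih _ l h

lemma pvSumCol_zero (lines : List (List String)) (j : Nat)
    (h : ∀ l ∈ lines, l.length ≤ j) : pvSumCol lines j = 0 := by
  unfold pvSumCol
  apply List.sum_eq_zero
  intro x hx
  rcases List.mem_map.mp hx with ⟨l, hl, rfl⟩
  simp [pvColVal, show ¬ j < l.length by have := h l hl; omega]

-- ===== VERDICT (by name: the statement is the Claim_ definition above) =====
theorem get_bit_frequency_spec : Claim_equal_get_bit_frequency := by
  intro lines _ _
  unfold Spec_get_bit_frequency get_bit_frequency get_bit_frequency_alt
  set M := lines.foldl (fun m line => max m line.length) 0 with hM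
  apply List.ext_getElem
  · rw [pvOuterA_length, pvOuterB_length]
  · intro j h1 h2
    have hj12 : j < 12 := by
      have h1x := h1
      rw [pvOuterA_length] at h1x
      simpa using h1x
    have hgetD : ∀ (l : List Int) (hl : j < l.length), l[j] = l.getD j 0 := by
      intro l hl; rw [List.getD_eq_getElem l 0 hl]
    rw [hgetD _ h1, hgetD _ h2,
        pvOuterA_getD lines _ j (by simp [hj12]),
        pvOuterB_getD lines _ _ j (by simp [hj12])]
    by_cases h : j < min M 12
    · simp [h]
    · have hMj : M ≤ j := by omega
      have : pvSumCol lines j = 0 :=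
        pvSumCol_zero lines j (fun l hl => Nat.le_trans (pvMaxLen_le lines 0 l hl) hMj)
      simp [h, this]
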